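-- pv_equiv track=rewrite | github.com/picaindahouse/Code-Wars-Projects | Just Learn- 100 to 999 (at 120)/Side Project 117 (5 Kyu) (Ulam Sequence)/Side Project 117.py | ulam_sequence
-- ===== SOURCE A (Python) =====
-- def ulam_sequence(u0, u1, n):
--     boom, tom, t = [0] * max(u0,u1,n) * 2, [], 0
--     boom[u0], boom[u1] = 1, 1
--     for x in range(n):
--         while boom[t] != 1: t += 1
--         if tom and t + tom[-1] >= len(boom): boom.extend([0] * (t+tom[-1]+1 - len(boom)))
--         for w in tom: boom[t + w] += 1
--         tom.append(t)
--         t += 1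
--     return tom
-- ===== SOURCE B (Python) =====
-- def ulam_sequence(u0, u1, n):
--     # Recompute each candidate's representation count on demand from the set of
--     # accepted terms, instead of maintaining an incrementally-updated counting array.
--     terms = []
--     members = set()
--     lo = 0
--     while len(terms) < n:
--         # the sum of the two largest terms always has a unique representation,
--         # so the next term lies within [lo, bound]
--         bound = terms[-2] + terms[-1] if len(terms) >= 2 else max(u0, u1)
--         for v in range(lo, bound + 1):
--             c = 1 if v == u0 or v == u1 else 0
--             for w in terms:
--                 if 2 * w >= v:
--                     break
--                 if v - w in members:
--                     c += 1
--             if c == 1: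
--                 break
--         else:
--             raise ValueError("sequence terminates")
--         terms.append(v)
--         members.add(v)
--         lo = v + 1
--     return terms
-- ===== Notes on version B (the rewrite author's own statement) =====
-- stated objective: simpler
-- what changed: B recomputes each candidate's representation count on demand from the set of accepted terms (scanning candidates up to the sum of the two largest terms), instead of A's incrementally-updated and dynamically-extended counting array.
-- outside the precondition, e.g. on ulam_sequence(-3, 2, 3): A returns [2, 3, 5], B raises ValueError; on ulam_sequence(0, 2, 1): A returns [0], B returns [0]
import Mathlib
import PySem

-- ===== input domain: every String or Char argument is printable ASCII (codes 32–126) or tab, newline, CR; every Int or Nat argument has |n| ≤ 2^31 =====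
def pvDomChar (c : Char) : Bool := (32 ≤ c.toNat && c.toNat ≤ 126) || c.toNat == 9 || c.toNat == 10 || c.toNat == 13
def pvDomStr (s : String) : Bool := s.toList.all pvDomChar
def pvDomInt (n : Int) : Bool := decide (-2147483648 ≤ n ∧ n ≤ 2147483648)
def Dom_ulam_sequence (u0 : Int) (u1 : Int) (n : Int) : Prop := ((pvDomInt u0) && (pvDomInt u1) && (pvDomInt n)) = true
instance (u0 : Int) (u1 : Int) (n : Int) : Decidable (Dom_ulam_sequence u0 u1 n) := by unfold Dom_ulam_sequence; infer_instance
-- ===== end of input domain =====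

-- B recomputes each candidate's representation count on demand from the set of accepted
-- terms (bounding the search by the sum of the two largest terms), instead of A's
-- incrementally-updated counting array; objective: simpler.

-- ===== PORT A =====
-- 'while boom[t] != 1: t += 1' — t starts at 0 and is only incremented, so it is kept
-- as a Nat; boom[t] is Python indexing of a nonnegative in-Int index (none = IndexError).
def pvScanA (boom : List Int) (t : Nat) : Option Nat :=
  match hb : boom[t]? with
  | none => none
  | some v => if v = 1 then some t else pvScanA boom (t + 1)
termination_by boom.length - t
decreasing_by
  have : t < boom.length := (List.getElem?_eq_some_iff.mp hb).1
  omega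

-- 'boom[i] += 1' with Python index semantics (none = IndexError)
def pvIncAt (xs : List Int) (i : Int) : Option (List Int) :=
  match PySem.List.pyGet? xs i with
  | none => none
  | some v => PySem.List.pySet? xs i (v + 1)

-- 'for w in tom: boom[t + w] += 1'
def pvIncAll (boom : List Int) (p : Int) : List Int → Option (List Int)
  | [] => some boom
  | w :: ws =>
    match pvIncAt boom (p + w) with
    | none => none
    | some b => pvIncAll b p ws

-- 'for x in range(n): …' with state (boom, tom, t); returns tom (none = IndexError)
def pvLoopA (k : Nat) (boom : List Int) (tom : List Int) (t : Nat) : Option (List Int) :=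
  match k with
  | 0 => some tom
  | k + 1 =>
    match pvScanA boom t with
    | none => none
    | some p =>
      let boom1 :=
        match tom.getLast? with
        | none => boom
        | some last =>
          if (boom.length : Int) ≤ (p : Int) + last
          then boom ++ List.replicate ((p : Int) + last + 1 - (boom.length : Int)).toNat 0
          else boom
      match pvIncAll boom1 (p : Int) tom with
      | none => none
      | some boom2 => pvLoopA k boom2 (tom ++ [(p : Int)]) (p + 1)

def ulam_sequence (u0 : Int) (u1 : Int) (n : Int) : List Int :=
  -- boom, tom, t = [0] * max(u0,u1,n) * 2, [], 0 ; boom[u0], boom[u1] = 1, 1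
  let boom0 : List Int := List.replicate ((max u0 (max u1 n)).toNat * 2) 0
  match PySem.List.pySet? boom0 u0 1 with
  | none => []          -- IndexError
  | some b1 =>
    match PySem.List.pySet? b1 u1 1 with
    | none => []        -- IndexError
    | some b2 =>
      match pvLoopA n.toNat b2 [] 0 with
      | none => []      -- IndexError
      | some tom => tom

-- ===== PORT B =====
-- inner 'for w in terms: if 2*w >= v: break; if v - w in members: c += 1'
def pvRepsLoop (v : Int) (members : List Int) : List Int → Int
  | [] => 0
  | w :: ws =>
    if v ≤ 2 * w then 0
    else (if members.contains (v - w) then 1 else 0) + pvRepsLoop v members ws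

-- representation count of candidate v
def pvReps (u0 : Int) (u1 : Int) (v : Int) (terms : List Int) (members : List Int) : Int :=
  (if v = u0 ∨ v = u1 then 1 else 0) + pvRepsLoop v members terms

-- 'for v in range(lo, bound + 1): … if c == 1: break / else: raise ValueError'
def pvScanB (u0 : Int) (u1 : Int) (terms : List Int) (members : List Int)
    (v : Int) (fuel : Nat) : Option Int :=
  match fuel with
  | 0 => none           -- ValueError
  | f + 1 =>
    if pvReps u0 u1 v terms members = 1 then some v
    else pvScanB u0 u1 terms members (v + 1) f

-- 'bound = terms[-2] + terms[-1] if len(terms) >= 2 else max(u0, u1)'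
-- (the getD 0 never fires: under 'len ≥ 2' both negative lookups succeed)
def pvBoundB (u0 : Int) (u1 : Int) (terms : List Int) : Int :=
  if 2 ≤ terms.length
  then (PySem.List.pyGet? terms (-2)).getD 0 + (PySem.List.pyGet? terms (-1)).getD 0
  else max u0 u1

-- 'while len(terms) < n: …'
def pvLoopB (u0 : Int) (u1 : Int) (k : Nat) (terms : List Int)
    (members : PySem.Set Int) (lo : Int) : Option (List Int) :=
  match k with
  | 0 => some terms
  | k + 1 =>
    let bound := pvBoundB u0 u1 terms
    match pvScanB u0 u1 terms members lo (bound + 1 - lo).toNat with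
    | none => none      -- ValueError
    | some v => pvLoopB u0 u1 k (terms ++ [v]) (PySem.Set.add members v) (v + 1)

def ulam_sequence_alt (u0 : Int) (u1 : Int) (n : Int) : List Int :=
  match pvLoopB u0 u1 n.toNat [] [] 0 with
  | none => []          -- ValueError
  | some terms => terms

-- ===== PRECONDITION & SPEC =====
-- Pre_ excludes nonpositive seeds (except on trivial runs with n ≤ 0, where both return [])
-- and equal seeds with n ≥ 2: there A raises IndexError or returns values produced by
-- Python's negative-index wraparound, while B's upward scan raises ValueError when its
-- bounded search finds no next term.
def Pre_ulam_sequence (u0 : Int) (u1 : Int) (n : Int) : Prop :=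
  (1 ≤ u0 ∧ 1 ≤ u1 ∧ (u0 ≠ u1 ∨ n ≤ 1)) ∨
  (n ≤ 0 ∧ PySem.Raise.InRange ((max u0 (max u1 n)).toNat * 2) u0
         ∧ PySem.Raise.InRange ((max u0 (max u1 n)).toNat * 2) u1)
instance (u0 : Int) (u1 : Int) (n : Int) : Decidable (Pre_ulam_sequence u0 u1 n) := by
  unfold Pre_ulam_sequence; infer_instance
def pvWitness_ulam_sequence : Int × Int × Int := (1, 2, 5)

def Spec_ulam_sequence (u0 : Int) (u1 : Int) (n : Int) (out : List Int) : Prop := out = ulam_sequence_alt u0 u1 n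
instance (u0 : Int) (u1 : Int) (n : Int) (out : List Int) : Decidable (Spec_ulam_sequence u0 u1 n out) := by unfold Spec_ulam_sequence; infer_instance

-- ===== CLAIM (what is proved, stated in full; the proofs are below) =====
def Claim_equal_ulam_sequence : Prop := ∀ (u0 : Int) (u1 : Int) (n : Int), Dom_ulam_sequence u0 u1 n → Pre_ulam_sequence u0 u1 n → Spec_ulam_sequence u0 u1 n (ulam_sequence u0 u1 n)

-- ===== LEMMAS AND PROOFS =====

def pvCnt (u0 : Int) (u1 : Int) (S : List Int) (v : Int) : Int :=
  (if v = u0 ∨ v = u1 then 1 else 0)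
  + ((S.filter (fun w => decide (2 * w < v) && S.contains (v - w))).length : Int)

lemma cnt_nil (u0 u1 v : Int) : pvCnt u0 u1 [] v = (if v = u0 ∨ v = u1 then 1 else 0) := by
  simp [pvCnt]

lemma cnt_singleton (u0 u1 v m : Int) :
    pvCnt u0 u1 [m] v = (if v = u0 ∨ v = u1 then 1 else 0)
      + (if 2 * m < v ∧ v = 2 * m then 1 else 0) := by
  have he : ((v - m == m)) = decide (v = 2*m) := by
    by_cases h : v = 2*m <;> simp [h] <;> omega
  simp only [pvCnt, List.filter_cons, List.filter_nil, List.contains_cons, List.contains_nil,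
    Bool.or_false, he]
  by_cases h1 : 2 * m < v <;> by_cases h2 : v = 2 * m <;> simp [h1, h2]

lemma pvRepsLoop_eq (v : Int) (M : List Int) :
    ∀ T : List Int, T.Pairwise (· < ·) →
    pvRepsLoop v M T = ((T.filter (fun w => decide (2 * w < v) && M.contains (v - w))).length : Int) := by
  intro T hT
  induction T with
  | nil => simp [pvRepsLoop]
  | cons w ws ih =>
    have hw := (List.pairwise_cons.mp hT).1
    have hws := (List.pairwise_cons.mp hT).2
    by_cases hbreak : v ≤ 2 * w
    · have hnil : (w :: ws).filter (fun w => decide (2 * w < v) && M.contains (v - w)) = [] := by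
        apply List.filter_eq_nil_iff.mpr
        intro x hx
        rcases List.mem_cons.mp hx with rfl | hx
        · simp; omega
        · have := hw x hx; simp; intro; omega
      rw [hnil]; simp [pvRepsLoop, hbreak]
    · have h2 : decide (2 * w < v) = true := by simp; omega
      simp only [pvRepsLoop, if_neg hbreak, List.filter_cons, h2, Bool.true_and, ih hws]
      by_cases hc : v - w ∈ M <;> simp [hc] <;> push_cast <;> ring

lemma pvReps_eq_cnt (u0 u1 v : Int) (S : List Int) (hs : S.Pairwise (· < ·)) :
    pvReps u0 u1 v S S = pvCnt u0 u1 S v := by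
  rw [pvReps, pvCnt, pvRepsLoop_eq v S S hs]

lemma cnt_big_zero (u0 u1 : Int) (S : List Int) (bound i : Int)
    (hu0 : u0 ≤ bound) (hu1 : u1 ≤ bound)
    (hpair : ∀ x ∈ S, ∀ y ∈ S, x < y → x + y ≤ bound) (hi : bound < i) :
    pvCnt u0 u1 S i = 0 := by
  have hnil : S.filter (fun w => decide (2 * w < i) && S.contains (i - w)) = [] := by
    apply List.filter_eq_nil_iff.mpr
    intro x hx
    simp only [Bool.and_eq_true, decide_eq_true_eq, List.contains_iff_mem, not_and]
    intro h1 h2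
    have := hpair x hx (i - x) h2 (by omega)
    omega
  rw [pvCnt, hnil]
  have : ¬ (i = u0 ∨ i = u1) := by omega
  simp [this]

-- countP of a disjunction of disjoint tests splits

lemma countP_or_split {α : Type} (l : List α) (f g : α → Bool) (h : ∀ x ∈ l, ¬(f x = true ∧ g x = true)) :
    l.countP (fun x => f x || g x) = l.countP f + l.countP g := by
  induction l with
  | nil => simp
  | cons a l ih =>
    have ha := h a (by simp)
    have ih' := ih (fun x hx => h x (by simp [hx]))
    by_cases hf : f a <;> by_cases hg : g a
    · exact absurd ⟨hf, hg⟩ ha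
    all_goals simp [List.countP_cons, hf, hg, ih']; try omega

-- countP of an equality test on a Nodup list

lemma countP_eq_single {l : List Int} (hnd : l.Nodup) (a : Int) (c : Bool) :
    l.countP (fun x => decide (x = a) && c) = if a ∈ l ∧ c = true then 1 else 0 := by
  induction l with
  | nil => simp
  | cons b l ih =>
    have hnd' := (List.nodup_cons.mp hnd).2
    have hb := (List.nodup_cons.mp hnd).1
    by_cases hba : b = a
    · subst hba
      by_cases hc : c <;>
        simp_all [List.countP_cons, ih hnd']
    · have hbac : (decide (b = a) && c) = false := by simp [hba]
      have hiff : (a ∈ b :: l ∧ c = true) ↔ (a ∈ l ∧ c = true) := by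
        simp only [List.mem_cons]
        constructor
        · rintro ⟨h | h, hc⟩
          · exact absurd h.symm hba
          · exact ⟨h, hc⟩
        · exact fun ⟨h, hc⟩ => ⟨Or.inr h, hc⟩
      rw [List.countP_cons, hbac, ih hnd', if_congr hiff rfl rfl]
      simp

lemma cnt_append (u0 u1 : Int) (S : List Int) (p i : Int) (hs : S.Pairwise (· < ·))
    (hlt : ∀ x ∈ S, x < p) (hip : p < i) :
    pvCnt u0 u1 (S ++ [p]) i = pvCnt u0 u1 S i + (if i - p ∈ S then 1 else 0) := by
  have hpS : p ∉ S := fun h => absurd (hlt p h) (lt_irrefl p)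
  have hnd : S.Nodup := hs.imp ne_of_lt
  simp only [pvCnt, ← List.countP_eq_length_filter]
  rw [List.countP_append]
  -- the countP over S with the enlarged membership test
  have hcongr : S.countP (fun w => decide (2 * w < i) && (S ++ [p]).contains (i - w))
      = S.countP (fun w => (decide (2 * w < i) && S.contains (i - w))
                           || (decide (w = i - p) && decide (2 * (i - p) < i))) := by
    apply List.countP_congr
    intro x hx
    by_cases hxp : x = i - p
    · subst hxp
      have : ¬ S.contains (i - (i - p)) := by
        simpa using (by simpa using hpS : ¬ p ∈ S)
      simp only [List.contains_append, List.contains_cons, List.contains_nil]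
      simp_all
      try (constructor <;> intro h <;> omega)
    · simp only [List.contains_append, List.contains_cons, List.contains_nil]
      have : ¬ (i - x = p) := by omega
      simp [this, hxp]
  rw [hcongr, countP_or_split, countP_eq_single hnd]
  · -- singleton part and arithmetic case analysis
    have hone : List.countP (fun w => decide (2 * w < i) && (S ++ [p]).contains (i - w)) [p]
        = if 2 * p < i ∧ i - p ∈ S then 1 else 0 := by
      have hip2 : (i - p = p) ↔ (i = 2 * p) := by omega
      simp only [List.countP_cons, List.countP_nil, List.contains_append, List.contains_cons,
        List.contains_nil]
      by_cases h1 : 2 * p < i <;> by_cases h2 : i - p ∈ S <;>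
        simp_all <;> omega
    rw [hone]
    by_cases hm : i - p ∈ S
    · have hne2 : i ≠ 2 * p := by
        intro h
        apply hpS
        have he : i - p = p := by omega
        rwa [he] at hm
      by_cases hlt2 : 2 * p < i
      · have : ¬ (2 * (i - p) < i) := by omega
        simp [hm, hlt2, this]; ring
      · have : 2 * (i - p) < i := by omega
        simp [hm, hlt2, this]; ring
    · simp [hm]
  · rintro x hx ⟨h1, h2⟩
    simp only [Bool.and_eq_true, decide_eq_true_eq, List.contains_iff_mem] at h1 h2
    obtain ⟨-, hmem⟩ := h1
    obtain ⟨hxe, -⟩ := h2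
    apply hpS
    have he : i - x = p := by omega
    rwa [he] at hmem

lemma sorted_getElem_mono {S : List Int} (hs : S.Pairwise (· < ·)) {i j : Nat}
    (hij : i ≤ j) (hj : j < S.length) : S[i]'(by omega) ≤ S[j] := by
  rcases Nat.lt_or_ge i j with h | h
  · exact le_of_lt ((List.pairwise_iff_getElem.mp hs) i j (by omega) hj h)
  · have : i = j := by omega
    subst this; rfl

lemma sorted_le_last {S : List Int} (hs : S.Pairwise (· < ·)) (hne : 0 < S.length) :
    ∀ y ∈ S, y ≤ S[S.length - 1]'(by omega) := by
  intro y hy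
  obtain ⟨i, hi, rfl⟩ := List.mem_iff_getElem.mp hy
  exact sorted_getElem_mono hs (by omega) (by omega)

lemma sorted_le_snd {S : List Int} (hs : S.Pairwise (· < ·)) (h2 : 2 ≤ S.length) :
    ∀ y ∈ S, y < S[S.length - 1]'(by omega) → y ≤ S[S.length - 2]'(by omega) := by
  intro y hy hlt
  obtain ⟨i, hi, rfl⟩ := List.mem_iff_getElem.mp hy
  have : i ≠ S.length - 1 := by rintro rfl; exact absurd hlt (lt_irrefl _)
  exact sorted_getElem_mono hs (by omega) (by omega)

lemma sorted_pair_sum_le {S : List Int} (hs : S.Pairwise (· < ·)) (h2 : 2 ≤ S.length) :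
    ∀ x ∈ S, ∀ y ∈ S, x < y →
      x + y ≤ S[S.length - 2]'(by omega) + S[S.length - 1]'(by omega) := by
  intro x hx y hy hxy
  have hyb := sorted_le_last hs (by omega) y hy
  rcases eq_or_lt_of_le hyb with h | h
  · have hxa : x ≤ S[S.length - 2]'(by omega) := sorted_le_snd hs h2 x hx (by omega)
    omega
  · have hya := sorted_le_snd hs h2 y hy h
    have hxa : x ≤ S[S.length - 2]'(by omega) := by omega
    omega

lemma cnt_bound_one (u0 u1 : Int) (S : List Int) (hs : S.Pairwise (· < ·)) (h2' : 2 ≤ S.length)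
    (hmem1 : max u0 u1 ∈ S) (hpos : ∀ x ∈ S, 1 ≤ x) :
    pvCnt u0 u1 S (S[S.length - 2]'(by omega) + S[S.length - 1]'(by omega)) = 1 := by
  have h2 := h2'
  set a := S[S.length - 2]'(by omega) with hadef
  set b := S[S.length - 1]'(by omega) with hbdef
  have hnd : S.Nodup := hs.imp ne_of_lt
  have haS : a ∈ S := by rw [hadef]; exact List.getElem_mem _
  have hbS : b ∈ S := by rw [hbdef]; exact List.getElem_mem _
  have hab : a < b := (List.pairwise_iff_getElem.mp hs) _ _ (by omega) (by omega) (by omega)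
  have ha1 : 1 ≤ a := hpos a haS
  have hMb : max u0 u1 ≤ b := sorted_le_last hs (by omega) _ hmem1
  have hbase : ¬ (a + b = u0 ∨ a + b = u1) := by
    have h0 : u0 ≤ max u0 u1 := le_max_left _ _
    have h1 : u1 ≤ max u0 u1 := le_max_right _ _
    omega
  have hcongr : S.countP (fun w => decide (2 * w < a + b) && S.contains (a + b - w))
      = S.countP (fun w => decide (w = a) && true) := by
    apply List.countP_congr
    intro x hx
    by_cases hxa : x = a
    · subst hxa
      have he : a + b - a = b := by omega
      simp [he, hbS]
      omega
    · have hR : (decide (x = a) && true) = false := by simp [hxa]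
      rw [hR]
      have hnot : ¬ (2 * x < a + b ∧ a + b - x ∈ S) := by
        rintro ⟨h1, h2⟩
        have hyb := sorted_le_last hs (by omega) _ h2
        rcases eq_or_lt_of_le hyb with h | h
        · exact hxa (by omega)
        · have hya := sorted_le_snd hs h2' _ h2 h
          omega
      by_cases hA : 2 * x < a + b
      · by_cases hB : a + b - x ∈ S
        · exact absurd ⟨hA, hB⟩ hnot
        · simp [hB]
      · simp [hA]
  rw [pvCnt, if_neg hbase, ← List.countP_eq_length_filter, hcongr,
    countP_eq_single hnd a true]
  simp [haS]

lemma incAll_spec (p : Int) :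
    ∀ (tom boom : List Int), tom.Nodup →
    (∀ w ∈ tom, 0 ≤ p + w ∧ p + w < (boom.length : Int)) →
    ∃ b2, pvIncAll boom p tom = some b2 ∧ b2.length = boom.length ∧
      ∀ i : Nat, i < boom.length →
        b2.getD i 0 = boom.getD i 0 + (if ((i : Int) - p) ∈ tom then 1 else 0) := by
  intro tom
  induction tom with
  | nil => intro boom _ _; exact ⟨boom, rfl, rfl, by simp⟩
  | cons w ws ih =>
    intro boom hnd hin
    obtain ⟨hw0, hwlen⟩ := hin w (by simp)
    have hjn : p + w = (((p + w).toNat : Nat) : Int) := by omega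
    set j : Nat := (p + w).toNat with hj
    have hjlt : j < boom.length := by omega
    have hget : PySem.List.pyGet? boom (p + w) = some (boom[j]'hjlt) := by
      rw [hjn, PySem.List.pyGet?_natCast, List.getElem?_eq_getElem hjlt]
    have hset : PySem.List.pySet? boom (p + w) (boom[j]'hjlt + 1)
        = some (boom.set j (boom[j]'hjlt + 1)) := by
      rw [hjn, PySem.List.pySet?_natCast _ _ _ hjlt]
    set boom' := boom.set j (boom[j]'hjlt + 1) with hb'
    have hlen' : boom'.length = boom.length := by simp [hb']
    obtain ⟨b2, hrun, hlen2, hval2⟩ := ih boom' (List.nodup_cons.mp hnd).2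
      (by intro x hx; have := hin x (by simp [hx]); omega)
    refine ⟨b2, ?_, by omega, ?_⟩
    · simp only [pvIncAll, pvIncAt, hget, hset, hrun]
    · intro i hi
      have hvi := hval2 i (by omega)
      have hw_ws : w ∉ ws := (List.nodup_cons.mp hnd).1
      by_cases hij : i = j
      · subst hij
        have h1 : boom'.getD j 0 = boom.getD j 0 + 1 := by
          simp [hb', List.getD_eq_getElem?_getD, List.getElem?_set, hjlt,
            List.getElem?_eq_getElem hjlt]
        have hiw : (j : Int) - p = w := by omega
        have h3 : ((j : Int) - p) ∉ ws := by rw [hiw]; exact hw_ws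
        rw [hvi, h1, if_neg h3, if_pos (by simp [hiw] : ((j : Int) - p) ∈ w :: ws)]
        omega
      · have h1 : boom'.getD i 0 = boom.getD i 0 := by
          simp only [hb', List.getD_eq_getElem?_getD, List.getElem?_set]
          rw [if_neg (fun h => hij h.symm)]
        have hiw : (i : Int) - p ≠ w := by omega
        rw [hvi, h1]
        have hmc : (((i : Int) - p) ∈ w :: ws) ↔ (((i : Int) - p) ∈ ws) := by
          simp [List.mem_cons, hiw]
        by_cases hm : ((i : Int) - p) ∈ ws
        · rw [if_pos hm, if_pos (hmc.mpr hm)]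
        · rw [if_neg hm, if_neg (fun h => hm (hmc.mp h))]

lemma scans_agree (u0 u1 : Int) (S : List Int) (hs : S.Pairwise (· < ·)) (bound : Int)
    (hbc : pvCnt u0 u1 S bound = 1) :
    ∀ (fuel : Nat) (t : Nat) (boom : List Int),
    fuel = (bound + 1 - (t : Int)).toNat →
    (∀ i : Nat, t ≤ i → i < boom.length → boom.getD i 0 = pvCnt u0 u1 S (i : Int)) →
    bound < (boom.length : Int) → (t : Int) ≤ bound →
    ∃ p : Nat, pvScanA boom t = some p ∧
      pvScanB u0 u1 S S (t : Int) fuel = some (p : Int) ∧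
      t ≤ p ∧ (p : Int) ≤ bound ∧ pvCnt u0 u1 S (p : Int) = 1 ∧
      (∀ j : Int, (t : Int) ≤ j → j < (p : Int) → pvCnt u0 u1 S j ≠ 1) := by
  intro fuel
  induction fuel with
  | zero => intro t boom hf hval hbl ht; exfalso; omega
  | succ f ih =>
    intro t boom hf hval hbl ht
    have htl : t < boom.length := by omega
    have hget : boom[t]? = some (boom[t]'htl) := List.getElem?_eq_getElem htl
    have hbt : boom[t]'htl = pvCnt u0 u1 S (t : Int) := by
      have h := hval t le_rfl htl
      rwa [List.getD_eq_getElem?_getD, hget, Option.getD_some] at h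
    have hA : pvScanA boom t
        = if boom[t]'htl = 1 then some t else pvScanA boom (t + 1) := by
      conv_lhs => rw [pvScanA]
      split
      · next heq => rw [hget] at heq; cases heq
      · next v heq => rw [hget] at heq; cases heq; rfl
    have hB : pvScanB u0 u1 S S (t : Int) (f + 1)
        = if pvCnt u0 u1 S (t : Int) = 1 then some (t : Int)
          else pvScanB u0 u1 S S ((t : Int) + 1) f := by
      rw [pvScanB, pvReps_eq_cnt u0 u1 _ S hs]
    by_cases hc : pvCnt u0 u1 S (t : Int) = 1
    · refine ⟨t, ?_, ?_, le_rfl, ?_, hc, ?_⟩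
      · rw [hA, if_pos (by rw [hbt]; exact hc)]
      · rw [hB, if_pos hc]
      · exact ht
      · intro j h1 h2; omega
    · have htb : (t : Int) < bound := by
        rcases eq_or_lt_of_le ht with h | h
        · exact absurd (h ▸ hbc) hc
        · exact h
      obtain ⟨p, hpA, hpB, hp1, hp2, hp3, hp4⟩ := ih (t + 1) boom (by push_cast; omega)
        (fun i hi h2 => hval i (by omega) h2) hbl (by push_cast; omega)
      refine ⟨p, ?_, ?_, by omega, hp2, hp3, ?_⟩
      · rw [hA, if_neg (by rw [hbt]; exact hc)]; exact hpA
      · rw [hB, if_neg hc]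
        rw [show ((t : Int) + 1) = (((t + 1 : Nat) : Nat) : Int) by push_cast; ring]
        exact hpB
      · intro j h1 h2
        by_cases hj : j < (t : Int) + 1
        · rwa [(by omega : j = (t : Int))]
        · exact hp4 j (by push_cast; omega) h2

lemma boundB_nil (u0 u1 : Int) : pvBoundB u0 u1 [] = max u0 u1 := by simp [pvBoundB]

lemma boundB_one (u0 u1 m : Int) : pvBoundB u0 u1 [m] = max u0 u1 := by simp [pvBoundB]

lemma boundB_two (u0 u1 : Int) (S : List Int) (h2 : 2 ≤ S.length) :
    pvBoundB u0 u1 S = S[S.length - 2]'(by omega) + S[S.length - 1]'(by omega) := by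
  rw [pvBoundB, if_pos h2,
    PySem.List.pyGet?_neg_ofNat S 2 (by omega) (by omega),
    PySem.List.pyGet?_neg_ofNat S 1 (by omega) (by omega),
    List.getElem?_eq_getElem (by omega), List.getElem?_eq_getElem (by omega)]
  rfl

lemma loops_agree (u0 u1 : Int) (hu0 : 1 ≤ u0) (hu1 : 1 ≤ u1) :
    ∀ (k : Nat) (tom boom : List Int) (t : Nat),
    (tom.length + k ≤ 1 ∨ u0 ≠ u1) →
    (tom = [] ∨ tom = [min u0 u1] ∨ ∃ r, tom = min u0 u1 :: max u0 u1 :: r) →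
    tom.Pairwise (· < ·) →
    (∀ x ∈ tom, 1 ≤ x) →
    (∀ x ∈ tom, x < (t : Int)) →
    (tom = [] → t = 0) →
    (∀ l, tom.getLast? = some l → (t : Int) = l + 1) →
    (∀ i : Nat, t ≤ i → i < boom.length → boom.getD i 0 = pvCnt u0 u1 tom (i : Int)) →
    pvBoundB u0 u1 tom < (boom.length : Int) →
    ∃ res, pvLoopA k boom tom t = some res ∧ pvLoopB u0 u1 k tom tom (t : Int) = some res := by
  intro k
  induction k with
  | zero => exact fun tom boom t _ _ _ _ _ _ _ _ _ => ⟨tom, rfl, rfl⟩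
  | succ k ih =>
    intro tom boom t hone hshape hsort hpos hlt ht0 htl hval hbl
    have hmin1 : (1 : Int) ≤ min u0 u1 := le_min hu0 hu1
    rcases hshape with rfl | hm | ⟨r, hbig⟩
    · -- tom = []: the scan finds the smaller seed
      have ht0' : t = 0 := ht0 rfl
      subst ht0'
      have hbc : pvCnt u0 u1 [] (pvBoundB u0 u1 []) = 1 := by
        rw [boundB_nil, cnt_nil]
        rcases max_choice u0 u1 with h | h <;> simp [h]
      obtain ⟨p, hpA, hpB, htp, hpb, hcp, hminimal⟩ :=
        scans_agree u0 u1 [] hsort _ hbc _ 0 boom rfl (by simpa using hval)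
          hbl (by rw [boundB_nil]; omega)
      have hpmin : (p : Int) = min u0 u1 := by
        have hcmin : pvCnt u0 u1 [] (min u0 u1) = 1 := by
          rw [cnt_nil]; rcases min_choice u0 u1 with h | h <;> simp [h]
        have hge : min u0 u1 ≤ (p : Int) := by
          rw [cnt_nil] at hcp
          have hor : (p : Int) = u0 ∨ (p : Int) = u1 := by by_contra h; simp [h] at hcp
          have h1 := min_le_left u0 u1
          have h2 := min_le_right u0 u1
          rcases hor with h | h <;> omega
        have hle : (p : Int) ≤ min u0 u1 := by
          by_contra h
          exact hminimal (min u0 u1) (by omega) (by omega) hcmin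
        omega
      obtain ⟨res, hres1, hres2⟩ := ih [(p : Int)] boom (p + 1)
        (by
          rcases hone with h | h
          · left
            simp only [List.length_nil, List.length_cons] at h ⊢
            omega
          · right; exact h)
        (by right; left; rw [hpmin])
        (by simp)
        (by intro x hx; rw [List.mem_singleton] at hx; omega)
        (by intro x hx; rw [List.mem_singleton] at hx; push_cast; omega)
        (by intro h; cases h)
        (by intro l hl; simp at hl; push_cast; omega)
        (by
          intro i hi hilen
          have hold := hval i (by omega) hilen
          rw [hold, show [(p : Int)] = [] ++ [(p : Int)] from rfl,
            cnt_append u0 u1 [] (p : Int) (i : Int) (by simp) (by simp)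
              (by push_cast at hi ⊢; omega)]
          simp)
        (by rwa [boundB_one, ← boundB_nil u0 u1])
      refine ⟨res, ?_, ?_⟩
      · rw [pvLoopA, hpA]
        simp only [List.getLast?_nil, pvIncAll, List.nil_append]
        exact hres1
      · rw [pvLoopB, hpB]
        show pvLoopB u0 u1 k ([] ++ [(p : Int)]) (PySem.Set.add [] (p : Int)) ((p : Int) + 1)
          = some res
        have hadd : PySem.Set.add ([] : List Int) (p : Int) = [(p : Int)] := rfl
        rw [hadd, List.nil_append,
          show ((p : Int) + 1) = (((p + 1 : Nat) : Nat) : Int) by push_cast; ring]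
        exact hres2
    · -- tom = [min u0 u1]: the scan finds the larger seed
      subst hm
      have hne : u0 ≠ u1 := by
        rcases hone with h | h
        · simp only [List.length_cons, List.length_nil] at h; omega
        · exact h
      have hmM : min u0 u1 < max u0 u1 := min_lt_max.mpr hne
      have htm : (t : Int) = min u0 u1 + 1 := htl _ rfl
      have hbc : pvCnt u0 u1 [min u0 u1] (pvBoundB u0 u1 [min u0 u1]) = 1 := by
        rw [boundB_one, cnt_singleton, if_neg (by omega : ¬(2 * min u0 u1 < max u0 u1 ∧ max u0 u1 = 2 * min u0 u1))]
        rcases max_choice u0 u1 with h | h <;> simp [h]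
      obtain ⟨p, hpA, hpB, htp, hpb, hcp, hminimal⟩ :=
        scans_agree u0 u1 [min u0 u1] hsort _ hbc _ t boom rfl hval hbl
          (by rw [boundB_one]; omega)
      rw [boundB_one] at hpb hbl
      have hpM : (p : Int) = max u0 u1 := by
        rw [cnt_singleton, if_neg (by omega : ¬(2 * min u0 u1 < (p : Int) ∧ (p : Int) = 2 * min u0 u1))] at hcp
        have hor : (p : Int) = u0 ∨ (p : Int) = u1 := by by_contra h; simp [h] at hcp
        have hx := hlt (min u0 u1) (by simp)
        omega
      -- A-side: array extension and the increment pass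
      set boom1 := (if (boom.length : Int) ≤ (p : Int) + min u0 u1
          then boom ++ List.replicate ((p : Int) + min u0 u1 + 1 - (boom.length : Int)).toNat 0
          else boom) with hboom1
      have hlen1a : boom.length ≤ boom1.length := by
        rw [hboom1]; split <;> simp
      have hlen1b : (p : Int) + min u0 u1 < (boom1.length : Int) := by
        rw [hboom1]; split
        · next h => simp; omega
        · next h => push_cast at h ⊢; omega
      have hval1 : ∀ i : Nat, t ≤ i → i < boom1.length →
          boom1.getD i 0 = pvCnt u0 u1 [min u0 u1] (i : Int) := by
        intro i hi hilen
        by_cases hio : i < boom.length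
        · rw [hboom1]
          split
          · rw [List.getD_eq_getElem?_getD, List.getElem?_append_left hio,
              ← List.getD_eq_getElem?_getD]
            exact hval i hi hio
          · exact hval i hi hio
        · have hz : boom1.getD i 0 = 0 := by
            rw [hboom1] at hilen ⊢
            by_cases hext : (boom.length : Int) ≤ (p : Int) + min u0 u1
            · rw [if_pos hext] at hilen ⊢
              simp only [List.length_append, List.length_replicate] at hilen
              rw [List.getD_eq_getElem?_getD,
                List.getElem?_append_right (by omega : boom.length ≤ i),
                List.getElem?_replicate, if_pos (by omega)]
              rfl
            · rw [if_neg hext] at hilen; omega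
          rw [hz]
          exact (cnt_big_zero u0 u1 [min u0 u1] (max u0 u1) (i : Int) (le_max_left _ _)
            (le_max_right _ _) (by intro x hx y hy hxy; simp at hx hy; omega) (by omega)).symm
      obtain ⟨b2, hrun, hlen2, hval2⟩ := incAll_spec (p : Int) [min u0 u1] boom1
        (hsort.imp ne_of_lt)
        (by intro w hw; simp at hw; subst hw; omega)
      obtain ⟨res, hres1, hres2⟩ := ih ([min u0 u1] ++ [(p : Int)]) b2 (p + 1)
        (Or.inr hne)
        (by right; right; exact ⟨[], by rw [hpM]; rfl⟩)
        (by simp [List.pairwise_append]; omega)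
        (by intro x hx; simp at hx; rcases hx with h | h <;> omega)
        (by intro x hx; simp at hx; push_cast; rcases hx with h | h <;> omega)
        (by intro h; cases h)
        (by intro l hl; simp at hl; push_cast; omega)
        (by
          intro i hi hilen
          rw [hlen2] at hilen
          rw [hval2 i hilen, hval1 i (by omega) hilen,
            cnt_append u0 u1 [min u0 u1] (p : Int) (i : Int) hsort
              (by intro x hx; simp at hx; omega) (by push_cast at hi ⊢; omega)]
        )
        (by
          rw [boundB_two u0 u1 _ (by simp)]
          simp only [List.length_append, List.length_cons, List.length_nil]
          norm_num
          rw [hlen2]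
          push_cast
          omega)
      refine ⟨res, ?_, ?_⟩
      · rw [pvLoopA, hpA]
        simp only [List.getLast?_singleton, ← hboom1, hrun]
        exact hres1
      · rw [pvLoopB, hpB]
        show pvLoopB u0 u1 k ([min u0 u1] ++ [(p : Int)])
          (PySem.Set.add [min u0 u1] (p : Int)) ((p : Int) + 1) = some res
        rw [PySem.Set.add_of_not_mem (by simp; omega),
          show ((p : Int) + 1) = (((p + 1 : Nat) : Nat) : Int) by push_cast; ring]
        exact hres2
    · -- tom = min :: max :: r: the next term is at most the sum of the two largest
      subst hbig
      set tom := min u0 u1 :: max u0 u1 :: r with htom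
      have hne : u0 ≠ u1 := by
        rcases hone with h | h
        · simp only [htom, List.length_cons] at h; omega
        · exact h
      have hnn : tom ≠ [] := by simp [htom]
      have h2 : 2 ≤ tom.length := by simp [htom]
      have hlastsome : tom.getLast? = some (tom.getLast hnn) :=
        List.getLast?_eq_getLast hnn
      set l := tom.getLast hnn with hldef
      have htlast : (t : Int) = l + 1 := htl l hlastsome
      set a := tom[tom.length - 2]'(by omega) with hadef
      set b := tom[tom.length - 1]'(by omega) with hbdef
      have hlb : l = b := by rw [hldef, hbdef, List.getLast_eq_getElem]
      have hbound : pvBoundB u0 u1 tom = a + b := boundB_two u0 u1 tom h2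
      have haS : a ∈ tom := by rw [hadef]; exact List.getElem_mem _
      have hbS : b ∈ tom := by rw [hbdef]; exact List.getElem_mem _
      have ha1 : 1 ≤ a := hpos a haS
      have hb1 : 1 ≤ b := hpos b hbS
      have hMmem : max u0 u1 ∈ tom := by simp [htom]
      have hMb : max u0 u1 ≤ b := by
        have := sorted_le_last hsort (by omega) _ hMmem
        rwa [← hbdef] at this
      have hu0b : u0 ≤ a + b := by have := le_max_left u0 u1; omega
      have hu1b : u1 ≤ a + b := by have := le_max_right u0 u1; omega
      have hpair : ∀ x ∈ tom, ∀ y ∈ tom, x < y → x + y ≤ a + b := by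
        intro x hx y hy hxy
        have := sorted_pair_sum_le hsort h2 x hx y hy hxy
        rwa [← hadef, ← hbdef] at this
      have hbc : pvCnt u0 u1 tom (pvBoundB u0 u1 tom) = 1 := by
        rw [hbound]
        have := cnt_bound_one u0 u1 tom hsort h2 hMmem hpos
        rwa [← hadef, ← hbdef] at this
      obtain ⟨p, hpA, hpB, htp, hpb, hcp, hminimal⟩ :=
        scans_agree u0 u1 tom hsort _ hbc _ t boom rfl hval hbl
          (by rw [hbound]; omega)
      rw [hbound] at hpb hbl
      -- A-side: array extension and the increment pass
      set boom1 := (if (boom.length : Int) ≤ (p : Int) + l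
          then boom ++ List.replicate ((p : Int) + l + 1 - (boom.length : Int)).toNat 0
          else boom) with hboom1
      have hlen1a : boom.length ≤ boom1.length := by
        rw [hboom1]; split <;> simp
      have hlen1b : (p : Int) + l < (boom1.length : Int) := by
        rw [hboom1]; split
        · next h => simp; omega
        · next h => push_cast at h ⊢; omega
      have hval1 : ∀ i : Nat, t ≤ i → i < boom1.length →
          boom1.getD i 0 = pvCnt u0 u1 tom (i : Int) := by
        intro i hi hilen
        by_cases hio : i < boom.length
        · rw [hboom1]
          split
          · rw [List.getD_eq_getElem?_getD, List.getElem?_append_left hio,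
              ← List.getD_eq_getElem?_getD]
            exact hval i hi hio
          · exact hval i hi hio
        · have hz : boom1.getD i 0 = 0 := by
            rw [hboom1] at hilen ⊢
            by_cases hext : (boom.length : Int) ≤ (p : Int) + l
            · rw [if_pos hext] at hilen ⊢
              simp only [List.length_append, List.length_replicate] at hilen
              rw [List.getD_eq_getElem?_getD,
                List.getElem?_append_right (by omega : boom.length ≤ i),
                List.getElem?_replicate, if_pos (by omega)]
              rfl
            · rw [if_neg hext] at hilen; omega
          rw [hz]
          exact (cnt_big_zero u0 u1 tom (a + b) (i : Int) hu0b hu1b hpair (by omega)).symm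
      have hwle : ∀ w ∈ tom, w ≤ l := by
        intro w hw
        have := hlt w hw
        omega
      obtain ⟨b2, hrun, hlen2, hval2⟩ := incAll_spec (p : Int) tom boom1
        (hsort.imp ne_of_lt)
        (by
          intro w hw
          have h1 := hpos w hw
          have h3 := hwle w hw
          omega)
      obtain ⟨res, hres1, hres2⟩ := ih (tom ++ [(p : Int)]) b2 (p + 1)
        (Or.inr hne)
        (by right; right; exact ⟨r ++ [(p : Int)], by simp [htom]⟩)
        (by
          rw [List.pairwise_append]
          refine ⟨hsort, by simp, ?_⟩
          intro x hx y hy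
          rw [List.mem_singleton] at hy
          subst hy
          have := hlt x hx
          omega)
        (by
          intro x hx
          rw [List.mem_append, List.mem_singleton] at hx
          rcases hx with h | h
          · exact hpos x h
          · subst h; omega)
        (by
          intro x hx
          rw [List.mem_append, List.mem_singleton] at hx
          push_cast
          rcases hx with h | h
          · have := hlt x h; omega
          · subst h; omega)
        (by intro h; simp [htom] at h)
        (by
          intro l' hl'
          rw [List.getLast?_concat] at hl'
          cases hl'
          push_cast
          ring)
        (by
          intro i hi hilen
          rw [hlen2] at hilen
          rw [hval2 i hilen, hval1 i (by omega) hilen,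
            cnt_append u0 u1 tom (p : Int) (i : Int) hsort
              (by intro x hx; have := hlt x hx; omega) (by push_cast at hi ⊢; omega)]
        )
        (by
          rw [boundB_two u0 u1 _ (by simp [htom])]
          have hn' : (tom ++ [(p : Int)]).length = tom.length + 1 := by simp
          have hg1 : (tom ++ [(p : Int)])[(tom ++ [(p : Int)]).length - 1]'(by omega)
              = (p : Int) := by
            rw [List.getElem_append_right (by simp : tom.length ≤ (tom ++ [(p : Int)]).length - 1)]
            exact List.getElem_singleton _
          have hg2 : (tom ++ [(p : Int)])[(tom ++ [(p : Int)]).length - 2]'(by omega)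
              = b := by
            rw [List.getElem_append_left (by simp [htom] : (tom ++ [(p : Int)]).length - 2 < tom.length)]
            rw [hbdef]
            congr 1
            simp
          rw [hg1, hg2, hlen2]
          push_cast
          omega)
      refine ⟨res, ?_, ?_⟩
      · rw [pvLoopA, hpA]
        simp only [hlastsome, ← hboom1, hrun]
        exact hres1
      · rw [pvLoopB, hpB]
        show pvLoopB u0 u1 k (tom ++ [(p : Int)])
          (PySem.Set.add tom (p : Int)) ((p : Int) + 1) = some res
        rw [PySem.Set.add_of_not_mem (by
            intro hmem
            have := hlt _ hmem
            omega),
          show ((p : Int) + 1) = (((p + 1 : Nat) : Nat) : Int) by push_cast; ring]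
        exact hres2

theorem ulam_top (u0 u1 n : Int)
    (hpre : 1 ≤ u0 ∧ 1 ≤ u1 ∧ (u0 ≠ u1 ∨ n ≤ 1)) :
    ulam_sequence u0 u1 n = ulam_sequence_alt u0 u1 n := by
  obtain ⟨hu0, hu1, hne⟩ := hpre
  have hM1 : 1 ≤ max u0 (max u1 n) := le_trans hu0 (le_max_left _ _)
  set L : Nat := (max u0 (max u1 n)).toNat * 2 with hL
  have hLI : (L : Int) = 2 * max u0 (max u1 n) := by rw [hL]; push_cast; omega
  have hmax01 : max u0 u1 ≤ max u0 (max u1 n) := by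
    have := le_max_left u1 n; have := le_max_left u0 (max u1 n); omega
  set boom0 : List Int := List.replicate L 0 with hboom0
  have hlen0 : boom0.length = L := by simp [hboom0]
  have hset1 : PySem.List.pySet? boom0 u0 1 = some (boom0.set u0.toNat 1) := by
    conv_lhs => rw [show u0 = ((u0.toNat : Nat) : Int) by omega]
    exact PySem.List.pySet?_natCast _ _ _ (by rw [hlen0]; omega)
  set b1 := boom0.set u0.toNat 1 with hb1
  have hlen1 : b1.length = L := by simp [hb1, hlen0]
  have hset2 : PySem.List.pySet? b1 u1 1 = some (b1.set u1.toNat 1) := by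
    conv_lhs => rw [show u1 = ((u1.toNat : Nat) : Int) by omega]
    exact PySem.List.pySet?_natCast _ _ _ (by rw [hlen1]; omega)
  set b2 := b1.set u1.toNat 1 with hb2
  have hlen2 : b2.length = L := by simp [hb2, hlen1]
  have hval0 : ∀ i : Nat, (0 : Nat) ≤ i → i < b2.length →
      b2.getD i 0 = pvCnt u0 u1 [] (i : Int) := by
    intro i _ hilen
    rw [hlen2] at hilen
    rw [cnt_nil]
    rw [hb2, hb1, List.getD_eq_getElem?_getD, List.getElem?_set, List.getElem?_set]
    by_cases h1 : i = u1.toNat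
    · subst h1
      rw [if_pos rfl]
      simp only [hlen0, List.length_set]
      rw [if_pos (by omega)]
      have hc : ((u1.toNat : Nat) : Int) = u1 := by omega
      simp [hc]
    · rw [if_neg (fun h => h1 h.symm)]
      by_cases h0 : i = u0.toNat
      · subst h0
        rw [if_pos rfl, if_pos (by rw [hlen0]; omega)]
        have hc : ((u0.toNat : Nat) : Int) = u0 := by omega
        have hc2 : ¬ ((u0.toNat : Nat) : Int) = u1 := by omega
        simp [hc, hc2]
      · rw [if_neg (fun h => h0 h.symm)]
        have hg : boom0[i]? = some 0 := by
          rw [hboom0, List.getElem?_replicate, if_pos hilen]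
        rw [hg]
        have hne0 : ¬((i : Int) = u0 ∨ (i : Int) = u1) := by omega
        simp [hne0]
  obtain ⟨res, hres1, hres2⟩ := loops_agree u0 u1 hu0 hu1 n.toNat [] b2 0
    (by
      rcases hne with h | h
      · right; exact h
      · left
        simp only [List.length_nil]
        omega)
    (Or.inl rfl)
    (by simp)
    (by simp)
    (by simp)
    (fun _ => rfl)
    (by intro l hl; cases hl)
    hval0
    (by rw [boundB_nil, hlen2]; omega)
  rw [ulam_sequence, ulam_sequence_alt]
  simp only [← hL, ← hboom0, hset1, hset2, ← hb1, ← hb2, hres1]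
  have h0 : ((0 : Nat) : Int) = 0 := rfl
  rw [h0] at hres2
  rw [hres2]

-- ===== VERDICT (by name: the statement is the Claim_ definition above) =====
-- on a trivial run (n ≤ 0, seed indexing in range) both programs return []
theorem ulam_trivial (u0 u1 n : Int) (hn : n ≤ 0)
    (h0 : PySem.Raise.InRange ((max u0 (max u1 n)).toNat * 2) u0)
    (h1 : PySem.Raise.InRange ((max u0 (max u1 n)).toNat * 2) u1) :
    ulam_sequence u0 u1 n = ulam_sequence_alt u0 u1 n := by
  have hk : n.toNat = 0 := by omega
  rw [ulam_sequence, ulam_sequence_alt, hk]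
  set boom0 : List Int := List.replicate ((max u0 (max u1 n)).toNat * 2) 0 with hboom0
  have hlen0 : boom0.length = (max u0 (max u1 n)).toNat * 2 := by simp [hboom0]
  rcases hs1 : PySem.List.pySet? boom0 u0 1 with _ | b1
  · rw [PySem.List.pySet?_eq_none_iff, hlen0] at hs1
    exact absurd h0 hs1
  · have hb1 : b1 = PySem.List.pySetD boom0 u0 1 := by
      simp [PySem.List.pySetD, hs1]
    have hlen1 : b1.length = boom0.length := by
      rw [hb1]; exact PySem.List.length_pySetD _ _ _
    rcases hs2 : PySem.List.pySet? b1 u1 1 with _ | b2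
    · rw [PySem.List.pySet?_eq_none_iff, hlen1, hlen0] at hs2
      exact absurd h1 hs2
    · simp only [hs2]
      rfl

theorem ulam_sequence_spec : Claim_equal_ulam_sequence := by
  intro u0 u1 n _ hpre
  rcases hpre with h | ⟨hn, h0, h1⟩
  · exact ulam_top u0 u1 n h
  · exact ulam_trivial u0 u1 n hn h0 h1
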